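-- pv_equiv track=rewrite | github.com/liushuang393/serverlessAIAgents | agentflow/services/chart_service.py | _detect_drill_fields
-- ===== SOURCE A (Python) =====
-- from typing import TYPE_CHECKING, Any
--
-- def _detect_drill_fields(
--
--     data: list[dict[str, Any]],
--     current_field: str,
-- ) -> list[str]:
--     """ドリルダウン可能なフィールドを検出."""
--     if not data:
--         return []
--
--     all_fields = list(data[0].keys())
--     drill_fields = []
--
--     for field in all_fields:
--         if field == current_field:
--             continue
--         # カテゴリカルなフィールドのみドリルダウン対象
--         unique_vals = {str(r.get(field, "")) for r in data[:100]}
--         if 2 <= len(unique_vals) <= 50: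
--             drill_fields.append(field)
--
--     return drill_fields[:5]  # 最大5フィールド
-- ===== SOURCE B (Python) =====
-- def _detect_drill_fields(data, current_field):
--     """ドリルダウン可能なフィールドを検出."""
--     if not data:
--         return []
--     head = data[:100]
--     out = []
--     for field in data[0].keys():
--         if len(out) == 5:
--             break
--         if field == current_field:
--             continue
--         # sort the column and count runs of equal values: #runs == #distinct
--         vals = sorted(str(r.get(field, "")) for r in head)
--         runs = 1 + sum(1 for a, b in zip(vals, vals[1:]) if a != b)
--         if 2 <= runs <= 50:
--             out.append(field)
--     return out
-- ===== Notes on version B (the rewrite author's own statement) =====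
-- stated objective: alternative
-- what changed: Distinct values per field are counted by sorting each column of the first 100 rows and counting adjacent-value transitions (runs) in the sorted column, instead of A's per-field hash-set comprehension; the field loop also breaks as soon as 5 drill fields are found instead of slicing afterwards.
import Mathlib
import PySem

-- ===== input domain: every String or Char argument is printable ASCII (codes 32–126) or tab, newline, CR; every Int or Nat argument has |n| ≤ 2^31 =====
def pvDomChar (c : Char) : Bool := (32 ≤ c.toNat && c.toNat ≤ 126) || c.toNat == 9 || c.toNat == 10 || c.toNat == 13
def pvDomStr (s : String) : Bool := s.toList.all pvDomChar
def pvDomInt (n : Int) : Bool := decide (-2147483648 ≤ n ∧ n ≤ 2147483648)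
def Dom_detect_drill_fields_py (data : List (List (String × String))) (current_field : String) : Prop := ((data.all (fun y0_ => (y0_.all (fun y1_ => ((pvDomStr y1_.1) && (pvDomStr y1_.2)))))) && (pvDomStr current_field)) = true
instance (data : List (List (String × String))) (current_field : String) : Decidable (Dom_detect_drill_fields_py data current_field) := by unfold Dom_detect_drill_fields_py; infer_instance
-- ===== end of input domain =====

-- B replaces A's per-field hash-set distinct counting with sort-and-count-runs per column
-- (sorted column, count adjacent transitions) and breaks out of the field loop at 5 matches
-- (alternative algorithm, same result). Return-value equivalence; neither mutates its arguments.

-- ===== PORT A =====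
def detect_drill_fields_py (data : List (List (String × String))) (current_field : String) : List String :=
  match data with
  | [] => []
  | r0 :: rest =>
    let all_fields := PySem.Dict.keys (PySem.Dict.ofList r0)
    let drill_fields := all_fields.foldl
      (fun acc field =>
        if field == current_field then acc
        else
          let unique_vals : PySem.Set String :=
            PySem.Set.ofList ((PySem.List.slice (r0 :: rest) none (some 100)).map
              (fun r => PySem.Dict.getD (PySem.Dict.ofList r) field ""))
          if 2 ≤ PySem.Set.len unique_vals ∧ PySem.Set.len unique_vals ≤ 50
          then acc ++ [field] else acc)
      []
    PySem.List.slice drill_fields none (some 5)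

-- ===== PORT B =====
-- runs = 1 + sum(1 for a, b in zip(vals, vals[1:]) if a != b)  over the sorted column
def pvRuns (head : List (List (String × String))) (field : String) : Int :=
  let vals := PySem.List.sorted
    (head.map (fun r => PySem.Dict.getD (PySem.Dict.ofList r) field "")) (fun x => x) false
  1 + ((vals.zip (PySem.List.slice vals (some 1) none)).map
        (fun p => if p.1 ≠ p.2 then (1 : Int) else 0)).sum

-- the field loop of Source B: append matches, break as soon as out holds 5 fields
def pvBLoop (head : List (List (String × String))) (cf : String) :
    List String → List String → List String
  | [], out => out
  | f :: rest, out =>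
    if PySem.List.len out == 5 then out
    else if f == cf then pvBLoop head cf rest out
    else if 2 ≤ pvRuns head f ∧ pvRuns head f ≤ 50 then pvBLoop head cf rest (out ++ [f])
    else pvBLoop head cf rest out

def detect_drill_fields_py_alt (data : List (List (String × String))) (current_field : String) : List String :=
  match data with
  | [] => []
  | r0 :: rest =>
    let head := PySem.List.slice (r0 :: rest) none (some 100)
    pvBLoop head current_field (PySem.Dict.keys (PySem.Dict.ofList r0)) []

-- ===== PRECONDITION & SPEC =====
def Spec_detect_drill_fields_py (data : List (List (String × String))) (current_field : String) (out : List String) : Prop := out = detect_drill_fields_py_alt data current_field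
instance (data : List (List (String × String))) (current_field : String) (out : List String) : Decidable (Spec_detect_drill_fields_py data current_field out) := by unfold Spec_detect_drill_fields_py; infer_instance

-- ===== CLAIM (what is proved, stated in full; the proofs are below) =====
def Claim_equal_detect_drill_fields_py : Prop := ∀ (data : List (List (String × String))) (current_field : String), Dom_detect_drill_fields_py data current_field → Spec_detect_drill_fields_py data current_field (detect_drill_fields_py data current_field)

-- ===== LEMMAS AND PROOFS =====

-- A's accumulation loop is a filter
theorem pv_afold_eq (cf : String) (q : String → Prop) [DecidablePred q]
    (fs : List String) (acc : List String) :
    fs.foldl (fun acc f => if f == cf then acc else if q f then acc ++ [f] else acc) acc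
      = acc ++ fs.filter (fun f => !(f == cf) && decide (q f)) := by
  induction fs generalizing acc with
  | nil => simp
  | cons f rest ih =>
    rw [List.foldl_cons, List.filter_cons]
    by_cases h1 : f == cf
    · rw [if_pos h1, ih]; simp [h1]
    · by_cases h2 : q f
      · rw [if_neg h1, if_pos h2, ih]; simp [h1, h2]
      · rw [if_neg h1, if_neg h2, ih]; simp [h1, h2]

-- B's field loop with break-at-5 is take 5 of the same filter
theorem pv_bloop_eq (head : List (List (String × String))) (cf : String)
    (fs : List String) (out : List String) (h : out.length ≤ 5) :
    pvBLoop head cf fs out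
      = (out ++ fs.filter (fun f => !(f == cf) &&
          decide (2 ≤ pvRuns head f ∧ pvRuns head f ≤ 50))).take 5 := by
  induction fs generalizing out with
  | nil =>
    simp only [pvBLoop, List.filter_nil, List.append_nil]
    exact (List.take_of_length_le h).symm
  | cons f rest ih =>
    simp only [pvBLoop, List.filter_cons]
    by_cases h5 : PySem.List.len out == 5
    · have hlen : out.length = 5 := by
        simp only [PySem.List.len_eq, beq_iff_eq] at h5
        exact_mod_cast h5
      rw [if_pos h5, List.take_append_of_le_length (by omega),
        List.take_of_length_le (by omega)]
    · have hlt : out.length < 5 := by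
        simp only [PySem.List.len_eq, beq_iff_eq] at h5
        omega
      rw [if_neg h5]
      by_cases h1 : f == cf
      · rw [if_pos h1, ih out h, if_neg (by simp [h1])]
      · by_cases h2 : 2 ≤ pvRuns head f ∧ pvRuns head f ≤ 50
        · rw [if_neg h1, if_pos h2, ih _ (by simp; omega), if_pos (by simp [h1, h2])]
          simp
        · rw [if_neg h1, if_neg h2, ih out h, if_neg (by simp [h2])]

-- structural run counter over a list
def pvR : List String → Int
  | [] => 0
  | [_] => 1
  | a :: b :: t => (if a ≠ b then 1 else 0) + pvR (b :: t)

-- the zip-with-tail 0/1 sum computes pvR on a nonempty list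
theorem pv_zipsum_eq_pvR (s : List String) (hs : s ≠ []) :
    1 + ((s.zip s.tail).map (fun p => if p.1 ≠ p.2 then (1 : Int) else 0)).sum = pvR s := by
  induction s with
  | nil => exact absurd rfl hs
  | cons a t ih =>
    cases t with
    | nil => simp [pvR]
    | cons b t' =>
      simp only [List.tail_cons, List.zip_cons_cons, List.map_cons, List.sum_cons, pvR]
      rw [← ih (by simp)]
      simp only [List.tail_cons]
      ring

-- on a sorted list, the number of runs is the number of distinct elements
theorem pv_pvR_sorted (s : List String) (hp : s.Pairwise (· ≤ ·)) :
    pvR s = (s.toFinset.card : Int) := by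
  induction s with
  | nil => simp [pvR]
  | cons a t ih =>
    cases t with
    | nil => simp [pvR]
    | cons b t' =>
      have hab : a ≤ b := (List.pairwise_cons.mp hp).1 b (by simp)
      have hp' : (b :: t').Pairwise (· ≤ ·) := (List.pairwise_cons.mp hp).2
      by_cases hne : a ≠ b
      · have hnotmem : a ∉ b :: t' := by
          intro hmem
          rcases List.mem_cons.mp hmem with rfl | hmem'
          · exact hne rfl
          · have hbx : b ≤ a := (List.pairwise_cons.mp hp').1 a hmem'
            exact hne (le_antisymm hab hbx)
        simp only [pvR, if_pos hne, ih hp']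
        rw [show ((a :: b :: t').toFinset) = insert a ((b :: t').toFinset) from List.toFinset_cons,
          Finset.card_insert_of_notMem (by simpa using hnotmem)]
        push_cast
        ring
      · rw [not_ne_iff] at hne
        subst hne
        simp only [pvR, ih hp']
        simp
-- permutation invariance of toFinset
theorem pv_toFinset_perm (l₁ l₂ : List String) (h : l₁.Perm l₂) : l₁.toFinset = l₂.toFinset := by
  ext x
  simp [List.mem_toFinset, h.mem_iff]

-- pvRuns equals A's distinct count, for a nonempty row prefix
theorem pv_runs_eq_setlen (head : List (List (String × String))) (field : String)
    (hh : head ≠ []) :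
    pvRuns head field
      = PySem.Set.len (PySem.Set.ofList
          (head.map (fun r => PySem.Dict.getD (PySem.Dict.ofList r) field ""))) := by
  simp only [pvRuns]
  set vs := head.map (fun r => PySem.Dict.getD (PySem.Dict.ofList r) field "") with hvs
  set s := PySem.List.sorted vs (fun x => x) false with hs
  have hvs_ne : vs ≠ [] := by simp [hvs, hh]
  have hs_ne : s ≠ [] := by
    rw [hs, Ne, PySem.List.sorted_eq_nil_iff]; exact hvs_ne
  rw [PySem.List.slice_from s (by norm_num), show (1:Int).toNat = 1 from rfl,
    List.drop_one, pv_zipsum_eq_pvR s hs_ne,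
    pv_pvR_sorted s (by simpa using PySem.List.sorted_pairwise vs (fun x => x)),
    pv_toFinset_perm s vs (PySem.List.sorted_perm vs (fun x => x) false)]
  have hnd : (PySem.Set.ofList vs).Nodup := PySem.Set.nodup_ofList vs
  have hto : (PySem.Set.ofList vs).toFinset = vs.toFinset := by
    ext x
    simp [List.mem_toFinset, PySem.Set.mem_ofList]
  rw [show PySem.Set.len (PySem.Set.ofList vs) = ((PySem.Set.ofList vs).length : Int) by
      simp [PySem.Set.len],
    ← List.toFinset_card_of_nodup hnd, hto]

-- ===== VERDICT (by name: the statement is the Claim_ definition above) =====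
theorem detect_drill_fields_py_spec : Claim_equal_detect_drill_fields_py := by
  intro data cf _dom
  unfold Spec_detect_drill_fields_py
  cases data with
  | nil => rfl
  | cons r0 rest =>
    simp only [detect_drill_fields_py, detect_drill_fields_py_alt]
    set head := PySem.List.slice (r0 :: rest) none (some 100) with hhead
    have hh : head ≠ [] := by
      rw [hhead, PySem.List.slice_to _ (by norm_num)]
      simp
    rw [pv_afold_eq, pv_bloop_eq head cf _ [] (by simp),
      PySem.List.slice_to _ (by norm_num), show ((5:Int).toNat) = 5 from rfl,
      List.nil_append]
    congr 1
    apply List.filter_congr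
    intro f _
    rw [pv_runs_eq_setlen head f hh]
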